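-- pv_equiv track=rewrite | github.com/Parapet-Tech/parapet | parapet-runner/parapet_runner/l2_corpus.py | _bucket_label
-- ===== SOURCE A (Python) =====
-- def _bucket_label(length: int, edges: tuple[int, ...]) -> str:
--     sorted_edges = sorted(set(edges))
--     prev = 0
--     for edge in sorted_edges:
--         if length <= edge:
--             return f"{prev}-{edge}"
--         prev = edge + 1
--     return f"{prev}+"
-- ===== SOURCE B (Python) =====
-- def _bucket_label(length: int, edges: tuple) -> str:
--     # One pass: the answer depends only on the largest edge < length and the
--     # smallest edge >= length; no sorting or deduplication is needed.
--     below = None  # max of edges strictly below length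
--     above = None  # min of edges at or above length
--     for e in edges:
--         if e < length:
--             if below is None or e > below:
--                 below = e
--         else:
--             if above is None or e < above:
--                 above = e
--     prev = 0 if below is None else below + 1
--     if above is None:
--         return f"{prev}+"
--     return f"{prev}-{above}"
-- ===== Notes on version B (the rewrite author's own statement) =====
-- stated objective: faster
-- what changed: Replaces A's sorted(set(edges)) followed by a linear scan with a single pass over the raw edges that tracks only the maximum edge below `length` and the minimum edge at/above it, from which the label is built directly.
import Mathlib
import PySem

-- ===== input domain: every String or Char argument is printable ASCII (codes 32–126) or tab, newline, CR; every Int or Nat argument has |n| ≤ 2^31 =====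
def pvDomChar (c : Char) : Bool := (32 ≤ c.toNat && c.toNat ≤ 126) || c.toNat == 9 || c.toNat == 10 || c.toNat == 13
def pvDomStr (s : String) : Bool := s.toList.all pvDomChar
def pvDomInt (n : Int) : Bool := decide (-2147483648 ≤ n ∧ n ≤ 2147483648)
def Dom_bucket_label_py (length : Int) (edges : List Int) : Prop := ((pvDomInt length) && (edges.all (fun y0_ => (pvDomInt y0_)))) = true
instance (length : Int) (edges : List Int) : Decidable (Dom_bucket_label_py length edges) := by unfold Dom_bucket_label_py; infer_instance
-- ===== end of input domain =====

-- B replaces A's sort(set(...))-then-scan with a single pass tracking the max edge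
-- below `length` and the min edge at/above it (no sort, no dedup); same return value.

-- ===== PORT A =====
-- A's for-loop with early return and the `prev` accumulator
def pvScanA (length prev : Int) (l : List Int) : String :=
  match l with
  | [] => PySem.Int.toStr prev ++ "+"
  | e :: t =>
    if length ≤ e then PySem.Int.toStr prev ++ "-" ++ PySem.Int.toStr e
    else pvScanA length (e + 1) t

def bucket_label_py (length : Int) (edges : List Int) : String :=
  pvScanA length 0 (PySem.List.sorted (PySem.Set.ofList edges) (fun x => x))

-- ===== PORT B =====
-- one step of B's loop on the state (below, above)
def pvStepB (length : Int) (st : Option Int × Option Int) (e : Int) : Option Int × Option Int :=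
  if e < length then
    (match st.1 with
     | none => some e
     | some b => if e > b then some e else some b, st.2)
  else
    (st.1,
     match st.2 with
     | none => some e
     | some a => if e < a then some e else some a)

def bucket_label_py_alt (length : Int) (edges : List Int) : String :=
  let st := edges.foldl (pvStepB length) (none, none)
  let prev : Int := match st.1 with | none => 0 | some b => b + 1
  match st.2 with
  | none => PySem.Int.toStr prev ++ "+"
  | some a => PySem.Int.toStr prev ++ "-" ++ PySem.Int.toStr a

-- ===== PRECONDITION & SPEC =====
def Spec_bucket_label_py (length : Int) (edges : List Int) (out : String) : Prop := out = bucket_label_py_alt length edges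
instance (length : Int) (edges : List Int) (out : String) : Decidable (Spec_bucket_label_py length edges out) := by unfold Spec_bucket_label_py; infer_instance

-- ===== CLAIM (what is proved, stated in full; the proofs are below) =====
def Claim_equal_bucket_label_py : Prop := ∀ (length : Int) (edges : List Int), Dom_bucket_label_py length edges → Spec_bucket_label_py length edges (bucket_label_py length edges)

-- ===== LEMMAS AND PROOFS =====

-- A's scan, characterised at any index r splitting the list into (< length) then (≥ length)
theorem pvScanA_char (length : Int) : ∀ (l : List Int) (prev : Int) (r : Nat),
    r ≤ l.length →
    (∀ j, j < l.length → j < r → l.getD j 0 < length) →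
    (∀ j, j < l.length → r ≤ j → length ≤ l.getD j 0) →
    pvScanA length prev l =
      (let p : Int := if r = 0 then prev else l.getD (r - 1) 0 + 1
       if r < l.length then PySem.Int.toStr p ++ "-" ++ PySem.Int.toStr (l.getD r 0)
       else PySem.Int.toStr p ++ "+") := by
  intro l
  induction l with
  | nil =>
    intro prev r hr _ _
    have : r = 0 := by simp at hr; omega
    subst this
    simp [pvScanA]
  | cons e t ih =>
    intro prev r hr h1 h2
    by_cases hle : length ≤ e
    · have hr0 : r = 0 := by
        by_contra h
        have := h1 0 (by simp) (by omega)
        simp at this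
        omega
      subst hr0
      simp [pvScanA, hle]
    · have hr0 : r ≠ 0 := by
        intro h
        subst h
        have := h2 0 (by simp) (by omega)
        simp at this
        omega
      obtain ⟨r', rfl⟩ : ∃ r', r = r' + 1 := ⟨r - 1, by omega⟩
      simp only [pvScanA, if_neg hle]
      rw [ih (e + 1) r' (by simp at hr; omega)
            (fun j hj hjr => by
              have := h1 (j + 1) (by simp; omega) (by omega)
              simpa using this)
            (fun j hj hrj => by
              have := h2 (j + 1) (by simp; omega) (by omega)
              simpa using this)]
      by_cases hr1 : r' = 0
      · subst hr1
        simp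
      · obtain ⟨k, rfl⟩ : ∃ k, r' = k + 1 := ⟨r' - 1, by omega⟩
        simp

-- the (< length)-elements of a ≤-sorted list form a prefix of length countP
theorem pv_countP_prefix (length : Int) (l : List Int) (hp : l.Pairwise (· ≤ ·)) :
    ∀ j, j < l.length → (j < l.countP (fun e => decide (e < length)) ↔ l.getD j 0 < length) := by
  induction l with
  | nil => intro j hj; simp at hj
  | cons e t ih =>
    rw [List.pairwise_cons] at hp
    obtain ⟨he, hp'⟩ := hp
    intro j hj
    by_cases hel : e < length
    · rw [List.countP_cons_of_pos (by simpa using hel)]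
      cases j with
      | zero => simpa using hel
      | succ k =>
        simp only [List.getD_cons_succ, Nat.add_lt_add_iff_right]
        exact ih hp' k (by simp at hj; omega)
    · rw [List.countP_cons_of_neg (by simpa using hel)]
      have hz : t.countP (fun e => decide (e < length)) = 0 := by
        rw [List.countP_eq_zero]
        intro a ha
        have := he a ha
        simp
        omega
      rw [hz]
      constructor
      · omega
      · intro hlt
        exfalso
        cases j with
        | zero => simp at hlt; omega
        | succ k =>
          simp only [List.getD_cons_succ] at hlt
          have hk : k < t.length := by simp at hj; omega
          have hmem : t.getD k 0 ∈ t := by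
            rw [List.getD_eq_getElem t 0 hk]
            exact List.getElem_mem hk
          have := he _ hmem
          omega

-- B's fold, projected to its two components
def pvMaxStep (length : Int) (acc : Option Int) (e : Int) : Option Int :=
  if e < length then (match acc with | none => some e | some b => if e > b then some e else some b) else acc
def pvMinStep (length : Int) (acc : Option Int) (e : Int) : Option Int :=
  if e < length then acc else (match acc with | none => some e | some a => if e < a then some e else some a)

theorem pv_fold_pair (length : Int) : ∀ (l : List Int) (acc : Option Int × Option Int),
    l.foldl (pvStepB length) acc = (l.foldl (pvMaxStep length) acc.1, l.foldl (pvMinStep length) acc.2) := by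
  intro l
  induction l with
  | nil => intro acc; rfl
  | cons e t ih =>
    intro acc
    rw [List.foldl_cons, List.foldl_cons, List.foldl_cons, ih]
    have hs1 : (pvStepB length acc e).1 = pvMaxStep length acc.1 e := by
      by_cases h : e < length <;> simp [pvStepB, pvMaxStep, h]
    have hs2 : (pvStepB length acc e).2 = pvMinStep length acc.2 e := by
      by_cases h : e < length <;> simp [pvStepB, pvMinStep, h]
    rw [hs1, hs2]

theorem pv_max_none (length : Int) : ∀ (l : List Int) (acc : Option Int),
    l.foldl (pvMaxStep length) acc = none ↔ acc = none ∧ ∀ e ∈ l, ¬ e < length := by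
  intro l
  induction l with
  | nil => intro acc; simp
  | cons e t ih =>
    intro acc
    rw [List.foldl_cons, ih]
    have hstep : pvMaxStep length acc e = none ↔ (acc = none ∧ ¬ e < length) := by
      cases acc <;> by_cases h : e < length <;> simp [pvMaxStep, h] <;> split <;> simp
    rw [hstep]
    simp only [List.mem_cons]
    constructor
    · rintro ⟨⟨h1, h2⟩, h3⟩
      exact ⟨h1, fun x hx => hx.elim (fun h => h ▸ h2) (h3 x)⟩
    · rintro ⟨h1, h2⟩
      exact ⟨⟨h1, h2 e (Or.inl rfl)⟩, fun x hx => h2 x (Or.inr hx)⟩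

theorem pv_max_some (length : Int) : ∀ (l : List Int) (acc : Option Int) (m : Int),
    l.foldl (pvMaxStep length) acc = some m →
      (acc = some m ∨ (m ∈ l ∧ m < length)) ∧
      (∀ b, acc = some b → b ≤ m) ∧ (∀ e ∈ l, e < length → e ≤ m) := by
  intro l
  induction l with
  | nil =>
    intro acc m h
    simp at h
    subst h
    exact ⟨Or.inl rfl, fun b hb => by simp at hb; omega, by simp⟩
  | cons e t ih =>
    intro acc m h
    rw [List.foldl_cons] at h
    obtain ⟨h1, h2, h3⟩ := ih (pvMaxStep length acc e) m h
    by_cases hel : e < length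
    · cases acc with
      | none =>
        rw [show pvMaxStep length none e = some e from by simp [pvMaxStep, hel]] at h1 h2
        refine ⟨?_, by simp, ?_⟩
        · rcases h1 with h1 | h1
          · exact Or.inr ⟨by simp [← Option.some.inj h1], by rw [← Option.some.inj h1]; exact hel⟩
          · exact Or.inr ⟨List.mem_cons_of_mem _ h1.1, h1.2⟩
        · intro x hx hxl
          rcases List.mem_cons.mp hx with rfl | hx
          · exact h2 x rfl
          · exact h3 x hx hxl
      | some b =>
        rw [show pvMaxStep length (some b) e = some (if e > b then e else b) from by
              by_cases hgt : e > b <;> simp [pvMaxStep, hel, hgt]] at h1 h2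
        have hMm : (if e > b then e else b) ≤ m := h2 _ rfl
        have hbM : b ≤ (if e > b then e else b) := by split <;> omega
        have heM : e ≤ (if e > b then e else b) := by split <;> omega
        refine ⟨?_, ?_, ?_⟩
        · rcases h1 with h1 | h1
          · have hm := Option.some.inj h1
            by_cases hgt : e > b
            · rw [if_pos hgt] at hm
              exact Or.inr ⟨by simp [← hm], hm ▸ hel⟩
            · rw [if_neg hgt] at hm
              exact Or.inl (by rw [hm])
          · exact Or.inr ⟨List.mem_cons_of_mem _ h1.1, h1.2⟩
        · intro b' hb'
          have : b = b' := Option.some.inj hb'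
          omega
        · intro x hx hxl
          rcases List.mem_cons.mp hx with rfl | hx
          · omega
          · exact h3 x hx hxl
    · rw [show pvMaxStep length acc e = acc from by simp [pvMaxStep, hel]] at h1 h2
      refine ⟨?_, h2, ?_⟩
      · rcases h1 with h1 | h1
        · exact Or.inl h1
        · exact Or.inr ⟨List.mem_cons_of_mem _ h1.1, h1.2⟩
      · intro x hx hxl
        rcases List.mem_cons.mp hx with rfl | hx
        · exact absurd hxl hel
        · exact h3 x hx hxl

theorem pv_min_none (length : Int) : ∀ (l : List Int) (acc : Option Int),
    l.foldl (pvMinStep length) acc = none ↔ acc = none ∧ ∀ e ∈ l, e < length := by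
  intro l
  induction l with
  | nil => intro acc; simp
  | cons e t ih =>
    intro acc
    rw [List.foldl_cons, ih]
    have hstep : pvMinStep length acc e = none ↔ (acc = none ∧ e < length) := by
      cases acc <;> by_cases h : e < length <;> simp [pvMinStep, h] <;> split <;> simp
    rw [hstep]
    simp only [List.mem_cons]
    constructor
    · rintro ⟨⟨h1, h2⟩, h3⟩
      exact ⟨h1, fun x hx => hx.elim (fun h => h ▸ h2) (h3 x)⟩
    · rintro ⟨h1, h2⟩
      exact ⟨⟨h1, h2 e (Or.inl rfl)⟩, fun x hx => h2 x (Or.inr hx)⟩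

theorem pv_min_some (length : Int) : ∀ (l : List Int) (acc : Option Int) (a : Int),
    l.foldl (pvMinStep length) acc = some a →
      (acc = some a ∨ (a ∈ l ∧ ¬ a < length)) ∧
      (∀ b, acc = some b → a ≤ b) ∧ (∀ e ∈ l, ¬ e < length → a ≤ e) := by
  intro l
  induction l with
  | nil =>
    intro acc a h
    simp at h
    subst h
    exact ⟨Or.inl rfl, fun b hb => by simp at hb; omega, by simp⟩
  | cons e t ih =>
    intro acc a h
    rw [List.foldl_cons] at h
    obtain ⟨h1, h2, h3⟩ := ih (pvMinStep length acc e) a h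
    by_cases hel : e < length
    · rw [show pvMinStep length acc e = acc from by simp [pvMinStep, hel]] at h1 h2
      refine ⟨?_, h2, ?_⟩
      · rcases h1 with h1 | h1
        · exact Or.inl h1
        · exact Or.inr ⟨List.mem_cons_of_mem _ h1.1, h1.2⟩
      · intro x hx hxl
        rcases List.mem_cons.mp hx with rfl | hx
        · exact absurd hel hxl
        · exact h3 x hx hxl
    · cases acc with
      | none =>
        rw [show pvMinStep length none e = some e from by simp [pvMinStep, hel]] at h1 h2
        refine ⟨?_, by simp, ?_⟩
        · rcases h1 with h1 | h1
          · exact Or.inr ⟨by simp [← Option.some.inj h1], by rw [← Option.some.inj h1]; exact hel⟩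
          · exact Or.inr ⟨List.mem_cons_of_mem _ h1.1, h1.2⟩
        · intro x hx hxl
          rcases List.mem_cons.mp hx with rfl | hx
          · exact h2 x rfl
          · exact h3 x hx hxl
      | some b =>
        rw [show pvMinStep length (some b) e = some (if e < b then e else b) from by
              by_cases hgt : e < b <;> simp [pvMinStep, hel, hgt]] at h1 h2
        have hMm : a ≤ (if e < b then e else b) := h2 _ rfl
        have hbM : (if e < b then e else b) ≤ b := by split <;> omega
        have heM : (if e < b then e else b) ≤ e := by split <;> omega
        refine ⟨?_, ?_, ?_⟩
        · rcases h1 with h1 | h1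
          · have hm := Option.some.inj h1
            by_cases hgt : e < b
            · rw [if_pos hgt] at hm
              exact Or.inr ⟨by simp [← hm], hm ▸ hel⟩
            · rw [if_neg hgt] at hm
              exact Or.inl (by rw [hm])
          · exact Or.inr ⟨List.mem_cons_of_mem _ h1.1, h1.2⟩
        · intro b' hb'
          have : b = b' := Option.some.inj hb'
          omega
        · intro x hx hxl
          rcases List.mem_cons.mp hx with rfl | hx
          · omega
          · exact h3 x hx hxl

-- monotone access of a ≤-sorted list
theorem pv_getD_mono (l : List Int) (hp : l.Pairwise (· ≤ ·)) (i j : Nat)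
    (hij : i ≤ j) (hj : j < l.length) : l.getD i 0 ≤ l.getD j 0 := by
  rw [List.getD_eq_getElem l 0 (by omega), List.getD_eq_getElem l 0 hj]
  rcases eq_or_lt_of_le hij with h | h
  · subst h; exact le_refl _
  · rw [List.pairwise_iff_getElem] at hp
    exact hp i j (by omega) hj h

-- ===== VERDICT (by name: the statement is the Claim_ definition above) =====
theorem bucket_label_py_spec : Claim_equal_bucket_label_py := by
  unfold Claim_equal_bucket_label_py
  intro length edges _
  unfold Spec_bucket_label_py bucket_label_py bucket_label_py_alt
  rw [pv_fold_pair]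
  set se := PySem.List.sorted (PySem.Set.ofList edges) (fun x => x) with hse
  have hlt : se.Pairwise (· < ·) := PySem.List.sorted_ofList_pairwise_lt edges
  have hple : se.Pairwise (· ≤ ·) := hlt.imp (fun h => le_of_lt h)
  have hmem : ∀ x : Int, x ∈ se ↔ x ∈ edges := by
    intro x
    rw [hse]
    simp [PySem.List.mem_sorted, PySem.Set.mem_ofList]
  set r := se.countP (fun e => decide (e < length)) with hrdef
  have hr_le : r ≤ se.length := List.countP_le_length
  have hiff := pv_countP_prefix length se hple
  rw [pvScanA_char length se 0 r hr_le
        (fun j hj hjr => (hiff j hj).mp hjr)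
        (fun j hj hrj =>
          Int.not_lt.mp (fun hx => absurd ((hiff j hj).mpr hx) (by omega)))]
  have hprev : (if r = 0 then (0 : Int) else se.getD (r - 1) 0 + 1)
      = (match edges.foldl (pvMaxStep length) none with | none => (0 : Int) | some b => b + 1) := by
    cases hB1 : edges.foldl (pvMaxStep length) none with
    | none =>
      have hall := (pv_max_none length edges none).mp hB1
      have hr0 : r = 0 := by
        rw [hrdef, List.countP_eq_zero]
        intro a ha
        simpa using hall.2 a ((hmem a).mp ha)
      simp [hr0]
    | some m =>
      obtain ⟨hm1, _, hm3⟩ := pv_max_some length edges none m hB1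
      rcases hm1 with h | ⟨hmm, hml⟩
      · exact absurd h (by simp)
      · have hr0 : r ≠ 0 := by
          intro h0
          have := List.countP_eq_zero.mp (hrdef ▸ h0) m ((hmem m).mpr hmm)
          simp at this
          omega
        have hr1lt : r - 1 < se.length := by omega
        have hlt1 : se.getD (r - 1) 0 < length := (hiff (r - 1) hr1lt).mp (by omega)
        have hmemg : se.getD (r - 1) 0 ∈ edges := by
          rw [List.getD_eq_getElem se 0 hr1lt]
          exact (hmem _).mp (List.getElem_mem hr1lt)
        have hle1 : se.getD (r - 1) 0 ≤ m := hm3 _ hmemg hlt1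
        obtain ⟨j, hj, hje⟩ := List.mem_iff_getElem.mp ((hmem m).mpr hmm)
        have hjr : j < r := (hiff j hj).mpr (by rw [List.getD_eq_getElem se 0 hj, hje]; exact hml)
        have hle2 : m ≤ se.getD (r - 1) 0 := by
          calc m = se.getD j 0 := by rw [List.getD_eq_getElem se 0 hj, hje]
          _ ≤ se.getD (r - 1) 0 := pv_getD_mono se hple j (r - 1) (by omega) hr1lt
        rw [if_neg hr0, le_antisymm hle1 hle2]
  cases hB2 : edges.foldl (pvMinStep length) none with
  | none =>
    have hall := (pv_min_none length edges none).mp hB2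
    have hrlen : r = se.length := by
      rw [hrdef, List.countP_eq_length]
      intro a ha
      simpa using hall.2 a ((hmem a).mp ha)
    simp only [if_neg (by omega : ¬ r < se.length)]
    rw [hprev]
  | some a =>
    obtain ⟨ha1, _, ha3⟩ := pv_min_some length edges none a hB2
    rcases ha1 with h | ⟨ham, hal⟩
    · exact absurd h (by simp)
    · have hrlt : r < se.length := by
        rcases Nat.lt_or_ge r se.length with h | h
        · exact h
        · exfalso
          have hreq : r = se.length := by omega
          have := List.countP_eq_length.mp (hrdef ▸ hreq.symm).symm a ((hmem a).mpr ham)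
          simp at this
          omega
      have hge : ¬ se.getD r 0 < length :=
        fun hx => absurd ((hiff r hrlt).mpr hx) (by omega)
      have hmemg : se.getD r 0 ∈ edges := by
        rw [List.getD_eq_getElem se 0 hrlt]
        exact (hmem _).mp (List.getElem_mem hrlt)
      have hle1 : a ≤ se.getD r 0 := ha3 _ hmemg hge
      obtain ⟨j, hj, hje⟩ := List.mem_iff_getElem.mp ((hmem a).mpr ham)
      have hjr : ¬ j < r := fun hx => by
        have := (hiff j hj).mp hx
        rw [List.getD_eq_getElem se 0 hj, hje] at this
        omega
      have hle2 : se.getD r 0 ≤ a := by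
        calc se.getD r 0 ≤ se.getD j 0 := pv_getD_mono se hple r j (by omega) hj
        _ = a := by rw [List.getD_eq_getElem se 0 hj, hje]
      simp only [if_pos hrlt]
      rw [hprev, le_antisymm hle2 hle1]
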